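-- pv_equiv track=rewrite | github.com/startFromBottom/programmers_problems_renewal | 2019 KAKAO BLIND RECRUITMENT/무지의 먹방 라이브.py | solution
-- ===== SOURCE A (Python) =====
-- def solution(food_times, k):
--     ans = -1
--
--     food_times = [(f, i) for i, f in enumerate(food_times)]
--     food_times.sort(key=lambda x: x[0])
--
--     i = 0
--     l = len(food_times)
--     before = 0
--
--     while i < l:
--         time = food_times[i][0]
--         start = i
--         while i + 1 < l and food_times[i + 1][0] == time:
--             i += 1
--         cnt = l - start
--
--         if k < (time - before) * cnt:
--             food_times[start:] = sorted(food_times[start:], key=lambda x: x[1])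
--             ans = food_times[start + (k % cnt)][1] + 1
--             break
--
--         k -= (time - before) * cnt
--         before = time
--         i += 1
--
--     return ans
-- ===== SOURCE B (Python) =====
-- def solution(food_times, k):
--     if not food_times or sum(food_times) <= k:
--         return -1
--     # binary-search the first minute-value T (between min and max) at which the total
--     # time needed to eat everything down to level T exceeds k
--     lo, hi = min(food_times), max(food_times)
--     while lo < hi:
--         mid = (lo + hi) // 2
--         if k < sum(min(f, mid) for f in food_times):
--             hi = mid
--         else:
--             lo = mid + 1
--     survivors = [i + 1 for i, f in enumerate(food_times) if f >= lo]
--     rest = k - sum(min(f, lo - 1) for f in food_times)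
--     return survivors[rest % len(survivors)]
-- ===== Notes on version B (the rewrite author's own statement) =====
-- stated objective: alternative
-- what changed: B abandons sorting entirely: it binary-searches the eating level T (smallest value where the cost sum(min(f,T)) exceeds k) between min and max of food_times, then recovers the answer with one filter pass, instead of A's sort of (value,index) pairs with a grouped sweep and an in-place tail re-sort.
import Mathlib
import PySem

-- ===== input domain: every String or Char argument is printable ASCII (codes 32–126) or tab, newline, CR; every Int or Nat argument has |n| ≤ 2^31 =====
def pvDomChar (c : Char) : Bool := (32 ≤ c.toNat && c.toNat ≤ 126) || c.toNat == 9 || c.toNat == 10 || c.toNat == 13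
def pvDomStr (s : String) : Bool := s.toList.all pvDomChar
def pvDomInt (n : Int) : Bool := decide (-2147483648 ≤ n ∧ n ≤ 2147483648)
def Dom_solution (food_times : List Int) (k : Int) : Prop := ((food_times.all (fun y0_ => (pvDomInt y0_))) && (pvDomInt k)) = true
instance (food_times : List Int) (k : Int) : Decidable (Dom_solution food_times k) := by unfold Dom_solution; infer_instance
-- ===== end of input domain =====

-- B replaces A's sort of (value,index) pairs + grouped sweep + in-place tail re-sort by a
-- binary search on the eating level (no sorting at all) plus one filter pass
-- (objective: alternative algorithm, similar cost).

-- ===== PORT A =====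
-- A's local list holds pairs (food_time, original_index); food_times[j][0] with j in range:
def pvFstAt (s : List (Int × Int)) (j : Int) : Int := (PySem.List.pyGetD s j (0, 0)).1

-- inner 'while i + 1 < l and food_times[i + 1][0] == time: i += 1'
def pvInnerA (s : List (Int × Int)) (time : Int) (i : Nat) : Nat :=
  if h : i + 1 < s.length ∧ pvFstAt s ((i : Int) + 1) = time then pvInnerA s time (i + 1) else i
termination_by s.length - i
decreasing_by omega

-- the lemma the outer loop's termination cites in decreasing_by
theorem pvInnerA_ge (s : List (Int × Int)) (time : Int) (i : Nat) : i ≤ pvInnerA s time i := by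
  fun_induction pvInnerA s time i with
  | case1 i h ih => omega
  | case2 i h => omega

-- outer 'while i < l: …' over state (i, before, k); the break returns the computed ans
def pvLoopA (s : List (Int × Int)) (i : Nat) (before k : Int) : Int :=
  if hi : i < s.length then
    let time := pvFstAt s (i : Int)
    let i' := pvInnerA s time i
    let cnt : Int := (s.length : Int) - (i : Int)
    if k < (time - before) * cnt then
      let s2 := s.take i ++ PySem.List.sorted (s.drop i) (fun x => x.2) false
      (PySem.List.pyGetD s2 ((i : Int) + PySem.Int.mod k cnt) (0, 0)).2 + 1
    else
      pvLoopA s (i' + 1) time (k - (time - before) * cnt)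
  else -1
termination_by s.length - i
decreasing_by have := pvInnerA_ge s (pvFstAt s (i : Int)) i; omega

def solution (food_times : List Int) (k : Int) : Int :=
  let ft := (PySem.List.enumerate food_times).map (fun p => (p.2, p.1))
  let s := PySem.List.sorted ft (fun x => x.1) false
  pvLoopA s 0 0 k

-- ===== PORT B =====
-- sum(food_times)
def pvSum (ft : List Int) : Int := ft.foldl (fun acc f => acc + f) 0

-- sum(min(f, v) for f in food_times)
def pvSumMin (ft : List Int) (v : Int) : Int := ft.foldl (fun acc f => acc + min f v) 0

-- bounds of the Python midpoint (lo+hi)//2, cited by pvBS's decreasing_by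
theorem pvMid_bounds (lo hi : Int) (h : lo < hi) :
    lo ≤ PySem.Int.floordiv (lo + hi) 2 ∧ PySem.Int.floordiv (lo + hi) 2 < hi := by
  constructor
  · rw [PySem.Int.le_floordiv_iff_mul_le (by omega)]; omega
  · rw [PySem.Int.floordiv_lt_iff_lt_mul (by omega)]; omega

-- 'while lo < hi: mid = (lo+hi)//2; if k < sum(min(f,mid)...): hi = mid else lo = mid+1'
def pvBS (ft : List Int) (k lo hi : Int) : Int :=
  if h : lo < hi then
    if k < pvSumMin ft (PySem.Int.floordiv (lo + hi) 2) then
      pvBS ft k lo (PySem.Int.floordiv (lo + hi) 2)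
    else pvBS ft k (PySem.Int.floordiv (lo + hi) 2 + 1) hi
  else lo
termination_by (hi - lo).toNat
decreasing_by
  · have := pvMid_bounds lo hi h; omega
  · have := pvMid_bounds lo hi h; omega

def solution_alt (food_times : List Int) (k : Int) : Int :=
  if food_times = [] ∨ pvSum food_times ≤ k then -1
  else
    match PySem.List.min? food_times (fun x => x), PySem.List.max? food_times (fun x => x) with
    | some lo0, some hi0 =>
      let T := pvBS food_times k lo0 hi0
      let survivors := ((PySem.List.enumerate food_times).filter
        (fun q => decide (T ≤ q.2))).map (fun q => q.1 + 1)
      let rest := k - pvSumMin food_times (T - 1)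
      PySem.List.pyGetD survivors (PySem.Int.mod rest (survivors.length : Int)) 0
    | _, _ => -1  -- unreachable: food_times ≠ [] here, so min?/max? are 'some'


-- ===== PRECONDITION & SPEC =====
def Spec_solution (food_times : List Int) (k : Int) (out : Int) : Prop := out = solution_alt food_times k
instance (food_times : List Int) (k : Int) (out : Int) : Decidable (Spec_solution food_times k out) := by unfold Spec_solution; infer_instance

-- ===== CLAIM (what is proved, stated in full; the proofs are below) =====
def Claim_equal_solution : Prop := ∀ (food_times : List Int) (k : Int), Dom_solution food_times k → Spec_solution food_times k (solution food_times k)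

-- ===== LEMMAS AND PROOFS =====

-- #{f in ft : a < f}, as an Int
def pvCntGt (ft : List Int) (a : Int) : Int := ((ft.filter (fun f => decide (a < f))).length : Int)

-- the value A's sweep returns when it breaks at level t (proof-side reference)
def pvAns (ft : List Int) (k t : Int) : Int :=
  PySem.List.pyGetD (((PySem.List.enumerate ft).filter (fun q => decide (t ≤ q.2))).map (fun q => q.1))
    (PySem.Int.mod (k - pvSumMin ft (t - 1)) (pvCntGt ft (t - 1))) 0 + 1

-- proof-side reference sweep over the sorted distinct values (A's algorithm, functionally)
def pvSweep (ft : List Int) : List Int → Int → Int → Int → Int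
  | [], _, _, _ => -1
  | t :: ts, remaining, prev, k =>
    if k < (t - prev) * remaining then
      let rem := ((PySem.List.enumerate ft).filter (fun q => decide (t ≤ q.2))).map (fun q => q.1)
      PySem.List.pyGetD rem (PySem.Int.mod k remaining) 0 + 1
    else pvSweep ft ts (remaining - (ft.count t : Int)) t (k - (t - prev) * remaining)

-- the pair list A sorts: (value, original index)
def pvE (food_times : List Int) : List (Int × Int) :=
  (PySem.List.enumerate food_times).map (fun p => (p.2, p.1))

theorem pvE_fsts (ft : List Int) : (pvE ft).map (fun p => p.1) = ft := by
  simp [pvE, Function.comp_def, PySem.List.map_snd_enumerate]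

theorem pvE_snd_pairwise (ft : List Int) : (pvE ft).Pairwise (fun a b => a.2 < b.2) := by
  have h := PySem.List.pairwise_lt_enumerate ft 0
  exact List.Pairwise.map _ (fun a b hab => by simpa using hab) h

theorem pvInnerA_eq (s : List (Int × Int)) (time : Int) (i : Nat) :
    pvInnerA s time i = i + ((s.drop (i + 1)).takeWhile (fun p => p.1 == time)).length := by
  fun_induction pvInnerA s time i with
  | case1 i h ih =>
    obtain ⟨hlt, heq⟩ := h
    have hget : pvFstAt s ((i : Int) + 1) = s[i+1].1 := by
      have : ((i : Int) + 1) = ((i + 1 : Nat) : Int) := by push_cast; ring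
      rw [this, pvFstAt, PySem.List.pyGetD_natCast, List.getD_eq_getElem?_getD,
        List.getElem?_eq_getElem hlt]
      rfl
    rw [ih, List.drop_eq_getElem_cons hlt, List.takeWhile_cons_of_pos (by simp [← hget, heq])]
    simp; omega
  | case2 i h =>
    by_cases hlt : i + 1 < s.length
    · have heq : ¬ pvFstAt s ((i : Int) + 1) = time := fun hc => h ⟨hlt, hc⟩
      have hget : pvFstAt s ((i : Int) + 1) = s[i+1].1 := by
        have : ((i : Int) + 1) = ((i + 1 : Nat) : Int) := by push_cast; ring
        rw [this, pvFstAt, PySem.List.pyGetD_natCast, List.getD_eq_getElem?_getD,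
          List.getElem?_eq_getElem hlt]
        rfl
      rw [List.drop_eq_getElem_cons hlt, List.takeWhile_cons_of_neg (by simp [← hget, heq])]
      rfl
    · rw [List.drop_eq_nil_iff.mpr (by omega)]
      rfl

-- main bridge: one pass of A's outer loop consumes exactly one distinct value of the sweep's list
theorem pvLoop_bridge (ft : List Int) :
    ∀ (ts : List Int) (i : Nat) (before k : Int),
    ts.Pairwise (· < ·) →
    (∀ t ∈ ts, t ∈ ft) →
    (∀ v ∈ ft, v ∈ ts ∨ ∀ t' ∈ ts, v < t') →
    ((PySem.List.sorted (pvE ft) (fun x => x.1) false).drop i).Perm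
      ((pvE ft).filter (fun p => decide (p.1 ∈ ts))) →
    pvLoopA (PySem.List.sorted (pvE ft) (fun x => x.1) false) i before k
      = pvSweep ft ts (((pvE ft).filter (fun p => decide (p.1 ∈ ts))).length : Int) before k := by
  intro ts
  induction ts with
  | nil =>
    intro i before k _ _ _ hperm
    simp only [List.not_mem_nil, decide_false, List.filter_false] at hperm ⊢
    have hnil : (PySem.List.sorted (pvE ft) (fun x => x.1) false).drop i = [] :=
      Eq.symm (List.Perm.nil_eq (hperm.symm))
    rw [pvLoopA, dif_neg (by have := List.drop_eq_nil_iff.mp hnil; omega)]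
    rfl
  | cons t ts' ih =>
    intro i before k hsort hmem hcover hperm
    set E := pvE ft with hE
    set s := PySem.List.sorted E (fun x => x.1) false with hs
    set P := E.filter (fun p => decide (p.1 ∈ t :: ts')) with hP
    -- t occurs in E
    have htft : t ∈ ft := hmem t List.mem_cons_self
    obtain ⟨p, hpE, hpt⟩ : ∃ p ∈ E, p.1 = t := by
      have : t ∈ E.map (fun p => p.1) := by rw [hE, pvE_fsts]; exact htft
      obtain ⟨p, hp, he⟩ := List.mem_map.mp this
      exact ⟨p, hp, he⟩
    have hpP : p ∈ P := by
      rw [hP]; exact List.mem_filter.mpr ⟨hpE, by simp [hpt]⟩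
    -- 0 < |P| so i < |s|
    have hlenP : ((s.drop i).length) = P.length := hperm.length_eq
    have hi : i < s.length := by
      have h1 : 0 < P.length := List.length_pos_of_mem hpP
      have h2 := List.length_drop (l := s) (i := i)
      omega
    -- pairwise on suffix
    have hspar : s.Pairwise (fun a b => a.1 ≤ b.1) := PySem.List.sorted_pairwise E _
    have hupar : (s.drop i).Pairwise (fun a b => a.1 ≤ b.1) := List.Pairwise.drop hspar
    have hu_cons : s.drop i = s[i] :: s.drop (i + 1) := List.drop_eq_getElem_cons hi
    -- membership facts of the suffix
    have humem : ∀ x ∈ s.drop i, x.1 ∈ t :: ts' := by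
      intro x hx
      have := List.mem_filter.mp (hperm.mem_iff.mp hx)
      simpa using this.2
    have hts'lt : ∀ x ∈ ts', t < x := (List.pairwise_cons.mp hsort).1
    -- head value is t
    have hhead : s[i].1 = t := by
      have hmem_head : s[i] ∈ s.drop i := by rw [hu_cons]; exact List.mem_cons_self
      have ha : t ≤ s[i].1 := by
        rcases List.mem_cons.mp (humem s[i] hmem_head) with h | h
        · omega
        · exact le_of_lt (hts'lt _ h)
      have hq : p ∈ s.drop i := hperm.symm.mem_iff.mp hpP
      have hb : s[i].1 ≤ t := by
        rw [hu_cons] at hq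
        rcases List.mem_cons.mp hq with rfl | hq'
        · omega
        · have := (List.pairwise_cons.mp (hu_cons ▸ hupar)).1 p hq'
          omega
      omega
    -- the filter over (t :: ts') is the filter over (t ≤ ·)
    have hfilter_eq : P = E.filter (fun q => decide (t ≤ q.1)) := by
      rw [hP]
      apply List.filter_congr
      intro x hx
      have hxft : x.1 ∈ ft := by
        rw [← pvE_fsts ft]; exact List.mem_map.mpr ⟨x, hx, rfl⟩
      rw [decide_eq_decide]
      constructor
      · intro h
        rcases List.mem_cons.mp h with rfl | h'
        · omega
        · exact le_of_lt (hts'lt _ h')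
      · intro h
        rcases hcover x.1 hxft with hin | hall
        · exact hin
        · exact absurd (hall t List.mem_cons_self) (by omega)
    -- time computed by A is t
    have htime : pvFstAt s (i : Int) = t := by
      rw [pvFstAt, PySem.List.pyGetD_natCast, List.getD_eq_getElem?_getD,
        List.getElem?_eq_getElem hi]
      exact hhead
    -- cnt = |P|
    have hcnt : (s.length : Int) - (i : Int) = (P.length : Int) := by
      have := List.length_drop (l := s) (i := i)
      omega
    -- unfold one step of A and one step of the sweep
    rw [pvLoopA, dif_pos hi]
    simp only [htime]
    show (if k < (t - before) * ((s.length : Int) - (i : Int)) then _ else _) = _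
    rw [hcnt]
    show _ = pvSweep ft (t :: ts') ((P.length : Int)) before k
    rw [pvSweep]
    have hPpos : 0 < P.length := List.length_pos_of_mem hpP
    split_ifs with hk
    · -- the break branch: both sides read the (k % cnt)-th remaining plate in index order
      set m := PySem.Int.mod k (P.length : Int) with hm
      have hm0 : 0 ≤ m := PySem.Int.mod_nonneg _ (by exact_mod_cast hPpos)
      have hmlt : m < (P.length : Int) := PySem.Int.mod_lt _ (by exact_mod_cast hPpos)
      have hmcast : m = ((m.toNat : Nat) : Int) := (Int.toNat_of_nonneg hm0).symm
      have hmN : m.toNat < P.length := by omega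
      -- the re-sorted tail IS P (unique snd keys)
      have hsorted : PySem.List.sorted (s.drop i) (fun x => x.2) false = P := by
        exact PySem.List.sorted_eq_of_perm_of_pairwise_lt _ P _ hperm.symm
          (hP ▸ List.Pairwise.filter _ (pvE_snd_pairwise ft))
      have htakelen : (s.take i).length = i := List.length_take_of_le (le_of_lt hi)
      have hlhs : (PySem.List.pyGetD (s.take i ++ PySem.List.sorted (s.drop i) (fun x => x.2) false)
            ((i : Int) + m) (0, 0)).2 = P[m.toNat].2 := by
        rw [hsorted]
        have hidx : (i : Int) + m = ((i + m.toNat : Nat) : Int) := by push_cast; omega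
        rw [hidx, PySem.List.pyGetD_natCast, List.getD_eq_getElem?_getD,
          List.getElem?_eq_getElem (by simp [htakelen]; omega)]
        rw [List.getElem_append_right (by omega)]
        simp [htakelen]
      have hrem : ((PySem.List.enumerate ft).filter (fun p => decide (t ≤ p.2))).map (fun p => p.1)
          = P.map (fun x => x.2) := by
        rw [hfilter_eq, hE, pvE, List.filter_map, List.map_map]
        simp [Function.comp_def]
      have hrhs : PySem.List.pyGetD
          (((PySem.List.enumerate ft).filter (fun p => decide (t ≤ p.2))).map (fun p => p.1)) m 0
          = P[m.toNat].2 := by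
        conv_lhs => rw [hrem, hmcast, PySem.List.pyGetD_natCast]
        rw [List.getD_eq_getElem?_getD, List.getElem?_eq_getElem (by simp; omega)]
        simp
      exact (by rw [hlhs]; exact (congrArg (fun z => z + 1) hrhs).symm :
        (PySem.List.pyGetD (s.take i ++ PySem.List.sorted (s.drop i) (fun x => x.2) false)
            ((i : Int) + m) (0, 0)).2 + 1
          = PySem.List.pyGetD
            (((PySem.List.enumerate ft).filter (fun p => decide (t ≤ p.2))).map (fun p => p.1)) m 0 + 1)
    · -- the consume-one-group branch
      set q : Int × Int → Bool := (fun x => decide (x.1 ∈ ts')) with hq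
      set tw := (s.drop i).takeWhile (fun p => p.1 == t) with htw
      set dw := (s.drop i).dropWhile (fun p => p.1 == t) with hdw
      have hsplit : tw ++ dw = s.drop i := List.takeWhile_append_dropWhile
      -- A's inner while lands at the end of the leading group of value t
      have hinner : pvInnerA s t i + 1 = i + tw.length := by
        rw [pvInnerA_eq, htw, hu_cons, List.takeWhile_cons_of_pos (by simp [hhead])]
        simp; omega
      have hdropg : s.drop (i + tw.length) = dw := by
        rw [← List.drop_drop, ← hsplit, List.drop_left]
      have htw_t : ∀ x ∈ tw, x.1 = t := by
        intro x hx
        simpa using List.mem_takeWhile_imp hx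
      have hdwpar : dw.Pairwise (fun a b => a.1 ≤ b.1) := by
        rw [← hdropg]; exact List.Pairwise.drop hspar
      have hdw_gt : ∀ x ∈ dw, t < x.1 := by
        cases hdwc : dw with
        | nil => simp
        | cons h r =>
          have hne : (s.drop i).dropWhile (fun p : Int × Int => p.1 == t) ≠ [] := by
            rw [← hdw, hdwc]; simp
          have hh := List.head_dropWhile_not (fun p : Int × Int => p.1 == t) hne
          have hdwc' : (s.drop i).dropWhile (fun p : Int × Int => p.1 == t) = h :: r := by rw [← hdw, hdwc]
          have hhne : h.1 ≠ t := by
            rw [show ((s.drop i).dropWhile (fun p : Int × Int => p.1 == t)).head hne = h by simp [hdwc']] at hh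
            simpa using hh
          have hhmem : h ∈ s.drop i :=
            (List.dropWhile_sublist (fun p : Int × Int => p.1 == t)).subset
              (by rw [hdwc']; exact List.mem_cons_self)
          have hht : t < h.1 := by
            rcases List.mem_cons.mp (humem h hhmem) with h1 | h1
            · omega
            · exact hts'lt _ h1
          intro x hx
          rcases List.mem_cons.mp hx with rfl | hx'
          · exact hht
          · have := (List.pairwise_cons.mp (hdwc ▸ hdwpar)).1 x hx'
            omega
      have htnots' : t ∉ ts' := fun hc => absurd (hts'lt t hc) (by omega)
      -- the rest of the suffix is a permutation of the plates with values in ts'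
      have hstep1 : E.filter q = P.filter q := by
        rw [hP, List.filter_filter]
        apply (List.filter_congr ?_).symm
        intro x _
        by_cases hx1 : x.1 ∈ ts' <;> simp [hq, hx1]
      have hstep3 : (s.drop i).filter q = dw := by
        rw [← hsplit, List.filter_append]
        rw [List.filter_eq_nil_iff.mpr (fun x hx => by simp [hq, htw_t x hx, htnots']),
          List.filter_eq_self.mpr (fun x hx => by
            have hxm : x ∈ s.drop i := hsplit ▸ List.mem_append_right _ hx
            rcases List.mem_cons.mp (humem x hxm) with h1 | h1
            · exact absurd h1 (by have := hdw_gt x hx; omega)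
            · simp [hq, h1])]
        simp
      have hdwP : (s.drop (i + tw.length)).Perm (E.filter q) := by
        rw [hdropg, hstep1, ← hstep3]
        exact hperm.filter q
      -- the count of value t is the size of the consumed group
      have hcount_tw : ft.count t = tw.length := by
        have h1 : ft.count t = E.countP (fun x => x.1 == t) := by
          have ha : E.countP (fun x => x.1 == t)
              = (PySem.List.enumerate ft).countP (fun x => x.2 == t) := by
            rw [hE, pvE, List.countP_map]; rfl
          have hb : ft.count t = (PySem.List.enumerate ft).countP (fun x => x.2 == t) := by
            conv_lhs => rw [show ft = (PySem.List.enumerate ft).map (fun x => x.2) from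
              (PySem.List.map_snd_enumerate ft 0).symm]
            rw [List.count, List.countP_map]
            rfl
          rw [ha, hb]
        have h2 : E.countP (fun x => x.1 == t) = P.countP (fun x => x.1 == t) := by
          rw [hP, List.countP_filter]
          apply List.countP_congr
          intro x _
          by_cases hx1 : x.1 = t <;> simp [hx1]
        have h3 : P.countP (fun x => x.1 == t) = (s.drop i).countP (fun x => x.1 == t) :=
          (hperm.countP_eq _).symm
        have h4 : (s.drop i).countP (fun x => x.1 == t) = tw.length := by
          rw [← hsplit, List.countP_append,
            List.countP_eq_length.mpr (fun x hx => by simp [htw_t x hx]),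
            List.countP_eq_zero.mpr (fun x hx => by have := hdw_gt x hx; simp; omega)]
          omega
        omega
      have hrem_eq : (P.length : Int) - (ft.count t : Int) = ((E.filter q).length : Int) := by
        have h5 : P.length = tw.length + dw.length := by
          rw [← hlenP, ← hsplit, List.length_append]
        have h6 : dw.length = (E.filter q).length := by
          rw [← hdropg]; exact hdwP.length_eq
        rw [hcount_tw]
        omega
      rw [hinner, hrem_eq]
      exact ih (i + tw.length) t (k - (t - before) * (P.length : Int))
        (List.Pairwise.of_cons hsort)
        (fun t' h => hmem t' (List.mem_cons_of_mem _ h))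
        (fun v hv => by
          rcases hcover v hv with h1 | h1
          · rcases List.mem_cons.mp h1 with rfl | h2
            · exact Or.inr (fun t' ht' => hts'lt t' ht')
            · exact Or.inl h2
          · exact Or.inr (fun t' ht' => h1 t' (List.mem_cons_of_mem _ ht')))
        hdwP

-- A equals the reference sweep over the sorted distinct values
theorem solution_eq_sweep (ft : List Int) (k : Int) :
    solution ft k
      = pvSweep ft (PySem.List.sorted (PySem.Set.ofList ft) (fun x => x) false)
          (ft.length : Int) 0 k := by
  unfold solution
  have hmemts : ∀ t : Int,
      t ∈ PySem.List.sorted (PySem.Set.ofList ft) (fun x => x) false ↔ t ∈ ft := by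
    intro t
    rw [PySem.List.mem_sorted, PySem.Set.mem_ofList]
  have hfilter : (pvE ft).filter
      (fun p => decide (p.1 ∈ PySem.List.sorted (PySem.Set.ofList ft) (fun x => x) false))
      = pvE ft := by
    apply List.filter_eq_self.mpr
    intro x hx
    have hx1 : x.1 ∈ ft := by
      rw [← pvE_fsts ft]
      exact List.mem_map.mpr ⟨x, hx, rfl⟩
    exact decide_eq_true ((hmemts x.1).mpr hx1)
  have hlen : ((pvE ft).filter
      (fun p => decide (p.1 ∈ PySem.List.sorted (PySem.Set.ofList ft) (fun x => x) false))).length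
      = ft.length := by
    rw [hfilter]
    simp [pvE, PySem.List.length_enumerate]
  have hmain := pvLoop_bridge ft
    (PySem.List.sorted (PySem.Set.ofList ft) (fun x => x) false) 0 0 k
    (PySem.List.sorted_ofList_pairwise_lt ft)
    (fun t h => (hmemts t).mp h)
    (fun v hv => Or.inl ((hmemts v).mpr hv))
    (by rw [List.drop_zero, hfilter]; exact PySem.List.sorted_perm _ _ _)
  rw [hlen] at hmain
  exact hmain

-- ========== second half: the sweep equals B's binary search ==========

theorem pvSumMin_eq_sum (ft : List Int) (v : Int) :
    pvSumMin ft v = (ft.map (fun f => min f v)).sum := by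
  rw [pvSumMin, PySem.List.foldl_add]
  ring

theorem pvSum_eq (ft : List Int) : pvSum ft = (ft.map (fun f => f)).sum := by
  rw [pvSum, PySem.List.foldl_add]
  ring

theorem pvSumMin_mono (ft : List Int) {v w : Int} (h : v ≤ w) :
    pvSumMin ft v ≤ pvSumMin ft w := by
  rw [pvSumMin_eq_sum, pvSumMin_eq_sum]
  exact List.sum_le_sum (fun f _ => min_le_min le_rfl h)

theorem pvCntGt_cons (f : Int) (ft : List Int) (a : Int) :
    pvCntGt (f :: ft) a = (if a < f then 1 else 0) + pvCntGt ft a := by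
  unfold pvCntGt
  rw [List.filter_cons]
  split_ifs with h1 h2 h3
  · simp; omega
  · simp at h1; omega
  · simp at h1; omega
  · simp

-- the cost of eating from level a down to level b, when no plate value lies strictly between
theorem pvSumMin_diff (ft : List Int) (a b : Int) (hab : a ≤ b)
    (hgap : ∀ f ∈ ft, f ≤ a ∨ b ≤ f) :
    pvSumMin ft b - pvSumMin ft a = (b - a) * pvCntGt ft a := by
  induction ft with
  | nil => simp [pvSumMin, pvCntGt]
  | cons f ft ih =>
    have hgap' : ∀ g ∈ ft, g ≤ a ∨ b ≤ g := fun g hg => hgap g (List.mem_cons_of_mem _ hg)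
    have hih := ih hgap'
    have hb : pvSumMin (f :: ft) b = min f b + pvSumMin ft b := by
      rw [pvSumMin_eq_sum, pvSumMin_eq_sum]; simp
    have ha : pvSumMin (f :: ft) a = min f a + pvSumMin ft a := by
      rw [pvSumMin_eq_sum, pvSumMin_eq_sum]; simp
    rw [hb, ha, pvCntGt_cons]
    by_cases hfa : f ≤ a
    · rw [min_eq_left (le_trans hfa hab), min_eq_left hfa, if_neg (by omega)]
      linarith [hih]
    · have hbf : b ≤ f := (hgap f List.mem_cons_self).resolve_left hfa
      rw [min_eq_right hbf, min_eq_right (by omega), if_pos (by omega)]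
      have hr : (b - a) * ((1 : Int) + pvCntGt ft a) = (b - a) + (b - a) * pvCntGt ft a := by ring
      rw [hr]
      linarith [hih]

theorem pvCntGt_congr (ft : List Int) (a b : Int)
    (hiff : ∀ f ∈ ft, (a < f ↔ b < f)) : pvCntGt ft a = pvCntGt ft b := by
  unfold pvCntGt
  have hfil : ft.filter (fun f => decide (a < f)) = ft.filter (fun f => decide (b < f)) := by
    apply List.filter_congr
    intro f hf
    rw [decide_eq_decide]
    exact hiff f hf
  rw [hfil]

theorem pvCnt_split (ft : List Int) (t : Int) :
    ((ft.filter (fun f => decide (t ≤ f))).length : Int)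
      = (ft.count t : Int) + pvCntGt ft t := by
  induction ft with
  | nil => simp [pvCntGt]
  | cons f ft ih =>
    have hcg := pvCntGt_cons f ft t
    rcases lt_trichotomy f t with hc | hc | hc
    · have h1 : (f :: ft).filter (fun g => decide (t ≤ g)) = ft.filter (fun g => decide (t ≤ g)) := by
        rw [List.filter_cons, if_neg (by simp; omega)]
      have h2 : (f :: ft).count t = ft.count t := by
        rw [List.count_cons, if_neg (by simp; omega)]; omega
      have h3 : pvCntGt (f :: ft) t = pvCntGt ft t := by
        rw [hcg, if_neg (by omega)]; ring
      rw [h1, h2, h3, ih]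
    · subst hc
      have h1 : (f :: ft).filter (fun g => decide (f ≤ g)) = f :: ft.filter (fun g => decide (f ≤ g)) := by
        rw [List.filter_cons, if_pos (by simp)]
      have h2 : (f :: ft).count f = ft.count f + 1 := by
        rw [List.count_cons, if_pos (by simp)]
      have h3 : pvCntGt (f :: ft) f = pvCntGt ft f := by
        rw [hcg, if_neg (by omega)]; ring
      rw [h1, h2, h3, List.length_cons]
      push_cast
      omega
    · have h1 : (f :: ft).filter (fun g => decide (t ≤ g)) = f :: ft.filter (fun g => decide (t ≤ g)) := by
        rw [List.filter_cons, if_pos (by simp; omega)]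
      have h2 : (f :: ft).count t = ft.count t := by
        rw [List.count_cons, if_neg (by simp; omega)]; omega
      have h3 : pvCntGt (f :: ft) t = 1 + pvCntGt ft t := by
        rw [hcg, if_pos hc]
      rw [h1, h2, h3, List.length_cons]
      push_cast
      omega

theorem pvCntGt_pred (ft : List Int) (t : Int) :
    pvCntGt ft (t - 1) = ((ft.filter (fun f => decide (t ≤ f))).length : Int) := by
  unfold pvCntGt
  have hfil : ft.filter (fun f => decide (t - 1 < f)) = ft.filter (fun f => decide (t ≤ f)) := by
    apply List.filter_congr
    intro f hf
    rw [decide_eq_decide]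
    omega
  rw [hfil]

theorem pvSumMin_const (ft : List Int) (v : Int) (h : ∀ f ∈ ft, v ≤ f) :
    pvSumMin ft v = v * (ft.length : Int) := by
  rw [pvSumMin_eq_sum, List.map_congr_left (fun f hf => min_eq_right (h f hf))]
  induction ft with
  | nil => simp
  | cons f ft ih =>
    simp only [List.map_cons, List.sum_cons, List.length_cons]
    rw [ih (fun g hg => h g (List.mem_cons_of_mem _ hg))]
    push_cast
    ring

theorem pvSum_eq_sumMin (ft : List Int) (M : Int) (h : ∀ f ∈ ft, f ≤ M) :
    pvSum ft = pvSumMin ft M := by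
  rw [pvSum_eq, pvSumMin_eq_sum, List.map_congr_left (fun f hf => (min_eq_left (h f hf)).symm)]

theorem pvMod_add_mul (x c m : Int) (hm : 0 < m) :
    PySem.Int.mod (x + c * m) m = PySem.Int.mod x m := by
  rw [PySem.Int.mod_eq_emod_of_pos hm, PySem.Int.mod_eq_emod_of_pos hm, mul_comm c m,
    Int.add_mul_emod_self_left]

-- positivity of the survivor count when some plate value exceeds the level
theorem pvCntGt_pos (ft : List Int) (t a : Int) (hmem : t ∈ ft) (ha : a < t) :
    0 < pvCntGt ft a := by
  unfold pvCntGt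
  have hm : t ∈ ft.filter (fun f => decide (a < f)) :=
    List.mem_filter.mpr ⟨hmem, by simpa using ha⟩
  exact_mod_cast List.length_pos_of_mem hm

-- the sweep, from a clean state (prev a plate value, everything ≤ prev eaten), finds the
-- first remaining distinct value whose cumulative cost exceeds k
theorem pvSweep_eq_find (ft : List Int) (k : Int) :
    ∀ (ts : List Int) (p : Int),
    ts.Pairwise (· < ·) →
    (∀ t ∈ ts, t ∈ ft ∧ p < t) →
    (∀ f ∈ ft, p < f → f ∈ ts) →
    pvSweep ft ts (pvCntGt ft p) p (k - pvSumMin ft p)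
      = (match ts.find? (fun t => decide (k < pvSumMin ft t)) with
         | none => -1
         | some t => pvAns ft k t) := by
  intro ts
  induction ts with
  | nil => intro p _ _ _; rfl
  | cons t ts ih =>
    intro p hpw hmem hcov
    obtain ⟨htft, hpt⟩ := hmem t List.mem_cons_self
    have hts_gt : ∀ x ∈ ts, t < x := (List.pairwise_cons.mp hpw).1
    have hgap : ∀ f ∈ ft, f ≤ p ∨ t ≤ f := by
      intro f hf
      by_cases hfp : f ≤ p
      · exact Or.inl hfp
      · rcases List.mem_cons.mp (hcov f hf (by omega)) with rfl | hin
        · exact Or.inr le_rfl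
        · exact Or.inr (le_of_lt (hts_gt f hin))
    have hcost : (t - p) * pvCntGt ft p = pvSumMin ft t - pvSumMin ft p :=
      (pvSumMin_diff ft p t (le_of_lt hpt) hgap).symm
    have hcnt : pvCntGt ft p = pvCntGt ft (t - 1) :=
      pvCntGt_congr ft p (t - 1) (fun f hf => by
        constructor
        · intro h; rcases hgap f hf with h1 | h1 <;> omega
        · intro h; omega)
    rw [pvSweep]
    by_cases hk : k < pvSumMin ft t
    · rw [if_pos (show k - pvSumMin ft p < (t - p) * pvCntGt ft p by rw [hcost]; omega),
        List.find?_cons_of_pos (by simpa using hk)]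
      show _ = pvAns ft k t
      unfold pvAns
      have hpos : (0 : Int) < pvCntGt ft (t - 1) := pvCntGt_pos ft t (t - 1) htft (by omega)
      have hdiff : pvSumMin ft (t - 1) - pvSumMin ft p = (t - 1 - p) * pvCntGt ft p :=
        pvSumMin_diff ft p (t - 1) (by omega) (fun f hf => by
          rcases hgap f hf with h1 | h1
          · exact Or.inl h1
          · exact Or.inr (by omega))
      have hidx : k - pvSumMin ft p
          = (k - pvSumMin ft (t - 1)) + (t - 1 - p) * pvCntGt ft (t - 1) := by
        rw [← hcnt]; linarith [hdiff]
      rw [hcnt, hidx, pvMod_add_mul _ _ _ hpos]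
    · rw [if_neg (show ¬ (k - pvSumMin ft p < (t - p) * pvCntGt ft p) by rw [hcost]; omega),
        List.find?_cons_of_neg (by simpa using hk)]
      have hrem : pvCntGt ft p - (ft.count t : Int) = pvCntGt ft t := by
        have h1 := pvCnt_split ft t
        have h2 := pvCntGt_pred ft t
        omega
      have hknew : k - pvSumMin ft p - (t - p) * pvCntGt ft p = k - pvSumMin ft t := by
        rw [hcost]; ring
      rw [hrem, hknew]
      exact ih t (List.Pairwise.of_cons hpw)
        (fun x hx => ⟨(hmem x (List.mem_cons_of_mem _ hx)).1, hts_gt x hx⟩)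
        (fun f hf hft => by
          rcases List.mem_cons.mp (hcov f hf (by omega)) with rfl | hin
          · omega
          · exact hin)

-- first step of the sweep from the initial state (prev = 0, remaining = n)
theorem pvSweep_top (ft : List Int) (k : Int) :
    pvSweep ft (PySem.List.sorted (PySem.Set.ofList ft) (fun x => x) false) (ft.length : Int) 0 k
      = (match (PySem.List.sorted (PySem.Set.ofList ft) (fun x => x) false).find?
            (fun t => decide (k < pvSumMin ft t)) with
         | none => -1
         | some t => pvAns ft k t) := by
  cases hds : PySem.List.sorted (PySem.Set.ofList ft) (fun x => x) false with
  | nil => rfl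
  | cons m rest =>
    have hmem_ds : ∀ x : Int, (x ∈ m :: rest) ↔ x ∈ ft := by
      intro x
      rw [← hds, PySem.List.mem_sorted, PySem.Set.mem_ofList]
    have hmft : m ∈ ft := (hmem_ds m).mp List.mem_cons_self
    have hnpos : 0 < ft.length := List.length_pos_of_mem hmft
    have hmin : ∀ f ∈ ft, m ≤ f := by
      intro f hf
      have hkey := PySem.List.key_head_sorted_le _ _ hds f ((PySem.Set.mem_ofList ft f).mpr hf)
      simpa using hkey
    have hpw : (m :: rest).Pairwise (· < ·) := hds ▸ PySem.List.sorted_ofList_pairwise_lt ft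
    have hrest_gt : ∀ x ∈ rest, m < x := (List.pairwise_cons.mp hpw).1
    have hlen_cnt : (ft.length : Int) = pvCntGt ft (m - 1) := by
      unfold pvCntGt
      rw [List.filter_eq_self.mpr (fun f hf => by have := hmin f hf; simpa using by omega)]
    have hgm1 : pvSumMin ft (m - 1) = (m - 1) * (ft.length : Int) :=
      pvSumMin_const ft (m - 1) (fun f hf => by have := hmin f hf; omega)
    have hgm : pvSumMin ft m = m * (ft.length : Int) :=
      pvSumMin_const ft m hmin
    rw [pvSweep]
    by_cases hk : k < pvSumMin ft m
    · rw [if_pos (show k < (m - 0) * (ft.length : Int) by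
          rw [show m - 0 = m from by ring, ← hgm]; exact hk),
        List.find?_cons_of_pos (by simpa using hk)]
      show _ = pvAns ft k m
      unfold pvAns
      rw [← hlen_cnt, hgm1]
      have hsplit : k - (m - 1) * (ft.length : Int)
          = k + (-(m - 1)) * (ft.length : Int) := by ring
      rw [hsplit, pvMod_add_mul _ _ _ (by exact_mod_cast hnpos)]
    · rw [if_neg (show ¬ (k < (m - 0) * (ft.length : Int)) by
          rw [show m - 0 = m from by ring, ← hgm]; exact hk),
        List.find?_cons_of_neg (by simpa using hk)]
      have hrem : (ft.length : Int) - (ft.count m : Int) = pvCntGt ft m := by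
        have h1 := pvCnt_split ft m
        have h2 : ((ft.filter (fun f => decide (m ≤ f))).length : Int) = (ft.length : Int) := by
          rw [List.filter_eq_self.mpr (fun f hf => by simpa using hmin f hf)]
        omega
      have hknew : k - (m - 0) * (ft.length : Int) = k - pvSumMin ft m := by
        rw [hgm]; ring
      rw [hrem, hknew]
      exact pvSweep_eq_find ft k rest m (List.Pairwise.of_cons hpw)
        (fun x hx => ⟨(hmem_ds x).mp (List.mem_cons_of_mem _ hx), hrest_gt x hx⟩)
        (fun f hf hmf => by
          rcases List.mem_cons.mp ((hmem_ds f).mpr hf) with rfl | hin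
          · omega
          · exact hin)

-- find? on a strictly sorted list returns the least element satisfying the predicate
theorem pvFind_least {l : List Int} {p : Int → Bool} {t : Int}
    (hs : l.Pairwise (· < ·)) (h : l.find? p = some t) :
    ∀ x ∈ l, x < t → p x = false := by
  induction l with
  | nil => simp
  | cons a l ih =>
    intro x hx hxt
    by_cases hpa : p a = true
    · rw [List.find?_cons_of_pos hpa] at h
      have hat : a = t := by injection h
      rcases List.mem_cons.mp hx with rfl | hin
      · omega
      · have := (List.pairwise_cons.mp hs).1 x hin
        omega
    · rw [List.find?_cons_of_neg (by simpa using hpa)] at h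
      rcases List.mem_cons.mp hx with rfl | hin
      · simpa using hpa
      · exact ih (List.Pairwise.of_cons hs) h x hin hxt

-- correctness of the binary search
theorem pvBS_spec (ft : List Int) (k : Int) :
    ∀ (n : Nat) (lo hi : Int), (hi - lo).toNat = n → lo ≤ hi → k < pvSumMin ft hi →
      lo ≤ pvBS ft k lo hi ∧ pvBS ft k lo hi ≤ hi ∧ k < pvSumMin ft (pvBS ft k lo hi) ∧
      (∀ x, lo ≤ x → x < pvBS ft k lo hi → pvSumMin ft x ≤ k) := by
  intro n
  induction n using Nat.strong_induction_on with
  | _ n ih =>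
    intro lo hi hn hle hhi
    rw [pvBS]
    by_cases h : lo < hi
    · rw [dif_pos h]
      set md := PySem.Int.floordiv (lo + hi) 2 with hmd
      have hmb := pvMid_bounds lo hi h
      have hm1 : lo ≤ md := by omega
      have hm2 : md < hi := by omega
      by_cases hc : k < pvSumMin ft md
      · rw [if_pos hc]
        obtain ⟨a1, a2, a3, a4⟩ := ih (md - lo).toNat (by omega) lo md rfl (by omega) hc
        exact ⟨a1, by omega, a3, a4⟩
      · rw [if_neg hc]
        obtain ⟨a1, a2, a3, a4⟩ := ih (hi - (md + 1)).toNat (by omega) (md + 1) hi rfl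
          (by omega) hhi
        refine ⟨by omega, a2, a3, ?_⟩
        intro x hx1 hx2
        by_cases hxm : md + 1 ≤ x
        · exact a4 x hxm hx2
        · have hmono := pvSumMin_mono ft (show x ≤ md by omega)
          omega
    · rw [dif_neg h]
      have hlh : lo = hi := by omega
      exact ⟨le_rfl, hle, by rw [hlh]; exact hhi,
        fun x h1 h2 => absurd h2 (by omega)⟩

-- the break value is insensitive to moving the level down inside a value-free gap
theorem pvAns_congr (ft : List Int) (k T t : Int) (hTt : T ≤ t)
    (hiff : ∀ f ∈ ft, (t ≤ f ↔ T ≤ f)) (hmem : t ∈ ft) :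
    pvAns ft k t = pvAns ft k T := by
  unfold pvAns
  have hfil : (PySem.List.enumerate ft).filter (fun q => decide (t ≤ q.2))
      = (PySem.List.enumerate ft).filter (fun q => decide (T ≤ q.2)) := by
    apply List.filter_congr
    intro q hq
    have hq2 : q.2 ∈ ft := by
      rw [← PySem.List.map_snd_enumerate ft 0]
      exact List.mem_map_of_mem hq
    rw [decide_eq_decide]
    exact hiff q.2 hq2
  have hcnt : pvCntGt ft (t - 1) = pvCntGt ft (T - 1) :=
    pvCntGt_congr ft (t - 1) (T - 1) (fun f hf => by have := hiff f hf; omega)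
  have hpos : (0 : Int) < pvCntGt ft (T - 1) :=
    pvCntGt_pos ft t (T - 1) hmem (by omega)
  have hdiff : pvSumMin ft (t - 1) - pvSumMin ft (T - 1)
      = (t - T) * pvCntGt ft (T - 1) := by
    have h := pvSumMin_diff ft (T - 1) (t - 1) (by omega) (fun f hf => by
      by_cases hfT : T ≤ f
      · exact Or.inr (by have := (hiff f hf).mpr hfT; omega)
      · exact Or.inl (by omega))
    have he : t - 1 - (T - 1) = t - T := by ring
    rw [he] at h
    exact h
  have hidx : k - pvSumMin ft (t - 1)
      = (k - pvSumMin ft (T - 1)) + (-(t - T)) * pvCntGt ft (T - 1) := by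
    linarith [hdiff]
  rw [hfil, hcnt, hidx, pvMod_add_mul _ _ _ hpos]

theorem pvEnumFilter_len (ft : List Int) (T : Int) :
    ((PySem.List.enumerate ft).filter (fun q => decide (T ≤ q.2))).length
      = (ft.filter (fun f => decide (T ≤ f))).length := by
  rw [← List.countP_eq_length_filter, ← List.countP_eq_length_filter]
  conv_rhs => rw [← PySem.List.map_snd_enumerate ft 0]
  rw [List.countP_map]
  rfl

theorem solution_alt_eq_sweep (ft : List Int) (k : Int) :
    pvSweep ft (PySem.List.sorted (PySem.Set.ofList ft) (fun x => x) false)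
        (ft.length : Int) 0 k
      = solution_alt ft k := by
  rw [pvSweep_top]
  unfold solution_alt
  by_cases hguard : ft = [] ∨ pvSum ft ≤ k
  · rw [if_pos hguard]
    have hnone : (PySem.List.sorted (PySem.Set.ofList ft) (fun x => x) false).find?
        (fun t => decide (k < pvSumMin ft t)) = none := by
      apply List.find?_eq_none.mpr
      intro x hx
      have hxft : x ∈ ft := by
        rw [PySem.List.mem_sorted, PySem.Set.mem_ofList] at hx
        exact hx
      rcases hguard with rfl | hsum
      · exact absurd hxft (by simp)
      · cases hM : PySem.List.max? ft (fun y => y) with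
        | none =>
          have hnil : ft = [] := (PySem.List.max?_eq_none_iff ft _).mp hM
          subst hnil
          exact absurd hxft (by simp)
        | some M =>
          have hMmax : ∀ y ∈ ft, y ≤ M := by
            have := PySem.List.max?_isMax hM
            simpa using this
          have h1 : pvSumMin ft x ≤ pvSumMin ft M := pvSumMin_mono ft (hMmax x hxft)
          have h2 : pvSumMin ft M = pvSum ft := (pvSum_eq_sumMin ft M hMmax).symm
          simpa using (by omega : ¬ (k < pvSumMin ft x))
    rw [hnone]
  · rw [if_neg hguard]
    push_neg at hguard
    obtain ⟨hne, hklt⟩ := hguard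
    cases hlo : PySem.List.min? ft (fun x => x) with
    | none => exact absurd ((PySem.List.min?_eq_none_iff ft _).mp hlo) hne
    | some lo0 =>
    cases hhi : PySem.List.max? ft (fun x => x) with
    | none => exact absurd ((PySem.List.max?_eq_none_iff ft _).mp hhi) hne
    | some hi0 =>
    have hlo0mem : lo0 ∈ ft := PySem.List.min?_mem hlo
    have hhi0mem : hi0 ∈ ft := PySem.List.max?_mem hhi
    have hlomin : ∀ f ∈ ft, lo0 ≤ f := by
      have := PySem.List.min?_isMin hlo
      simpa using this
    have hhimax : ∀ f ∈ ft, f ≤ hi0 := by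
      have := PySem.List.max?_isMax hhi
      simpa using this
    have hsum : pvSum ft = pvSumMin ft hi0 := pvSum_eq_sumMin ft hi0 hhimax
    obtain ⟨hT1, hT2, hT3, hT4⟩ := pvBS_spec ft k (hi0 - lo0).toNat lo0 hi0 rfl
      (hlomin hi0 hhi0mem) (by rw [← hsum]; exact hklt)
    set T := pvBS ft k lo0 hi0 with hTdef
    -- the find? finds something: hi0 itself satisfies the predicate
    have hfind_ex : ∃ x, (PySem.List.sorted (PySem.Set.ofList ft) (fun x => x) false).find?
        (fun t => decide (k < pvSumMin ft t)) = some x := by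
      cases hf : (PySem.List.sorted (PySem.Set.ofList ft) (fun x => x) false).find?
          (fun t => decide (k < pvSumMin ft t)) with
      | some x => exact ⟨x, rfl⟩
      | none =>
        exfalso
        have hh := List.find?_eq_none.mp hf hi0 (by
          rw [PySem.List.mem_sorted, PySem.Set.mem_ofList]
          exact hhi0mem)
        simp only [decide_eq_true_eq] at hh
        omega
    obtain ⟨tstar, hfind⟩ := hfind_ex
    have htpred : k < pvSumMin ft tstar := by
      have := List.find?_some hfind
      simpa using this
    have htmem : tstar ∈ ft := by
      have := List.mem_of_find?_eq_some hfind
      rwa [PySem.List.mem_sorted, PySem.Set.mem_ofList] at this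
    have hleast := pvFind_least (PySem.List.sorted_ofList_pairwise_lt ft) hfind
    have hTle : T ≤ tstar := by
      by_contra hlt
      have := hT4 tstar (hlomin tstar htmem) (by omega)
      omega
    have hiff : ∀ f ∈ ft, (tstar ≤ f ↔ T ≤ f) := by
      intro f hf
      constructor
      · intro h; omega
      · intro h
        by_contra hfs
        have hfds : f ∈ PySem.List.sorted (PySem.Set.ofList ft) (fun x => x) false := by
          rw [PySem.List.mem_sorted, PySem.Set.mem_ofList]
          exact hf
        have hfalse := hleast f hfds (by omega)
        have hmono : pvSumMin ft T ≤ pvSumMin ft f := pvSumMin_mono ft h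
        simp only [decide_eq_false_iff_not] at hfalse
        omega
    rw [hfind]
    show pvAns ft k tstar
      = PySem.List.pyGetD
          (((PySem.List.enumerate ft).filter (fun q => decide (T ≤ q.2))).map (fun q => q.1 + 1))
          (PySem.Int.mod (k - pvSumMin ft (T - 1))
            (((((PySem.List.enumerate ft).filter (fun q => decide (T ≤ q.2))).map
              (fun q => q.1 + 1)).length : Int))) 0
    rw [pvAns_congr ft k T tstar hTle hiff htmem]
    -- finally: pvAns ft k T = B's expression
    unfold pvAns
    set L := ((PySem.List.enumerate ft).filter (fun q => decide (T ≤ q.2))).map (fun q => q.1)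
      with hL
    have hmapmap : ((PySem.List.enumerate ft).filter (fun q => decide (T ≤ q.2))).map
        (fun q => q.1 + 1) = L.map (fun z => z + 1) := by
      rw [hL, List.map_map]
      rfl
    have hLlen : (L.length : Int) = pvCntGt ft (T - 1) := by
      rw [hL, List.length_map, pvCntGt_pred, pvEnumFilter_len]
    have hpos : (0 : Int) < pvCntGt ft (T - 1) :=
      pvCntGt_pos ft tstar (T - 1) htmem (by omega)
    set m := PySem.Int.mod (k - pvSumMin ft (T - 1)) (pvCntGt ft (T - 1)) with hm
    have hm0 : 0 ≤ m := PySem.Int.mod_nonneg _ hpos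
    have hmlt : m < pvCntGt ft (T - 1) := PySem.Int.mod_lt _ hpos
    have hmN : m.toNat < L.length := by omega
    rw [hmapmap, List.length_map, hLlen, ← hm]
    rw [show m = ((m.toNat : Nat) : Int) from (Int.toNat_of_nonneg hm0).symm,
      PySem.List.pyGetD_natCast, PySem.List.pyGetD_natCast]
    rw [List.getD_eq_getElem?_getD, List.getD_eq_getElem?_getD,
      List.getElem?_eq_getElem hmN, List.getElem?_eq_getElem (by simpa using hmN)]
    simp

-- ===== VERDICT (by name: the statement is the Claim_ definition above) =====
theorem solution_spec : Claim_equal_solution := by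
  intro food_times k _
  unfold Spec_solution
  rw [solution_eq_sweep, solution_alt_eq_sweep]
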